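-- pv_equiv track=rewrite | github.com/rotsl/envguard | src/envguard/resolver/markers.py | _tokenize_compound
-- ===== SOURCE A (Python) =====
-- def _tokenize_compound(marker: str) -> list[str]:
--     """Split a marker on top-level ``and`` / ``or`` keywords,
--     respecting parentheses."""
--     tokens: list[str] = []
--     depth = 0
--     current: list[str] = []
--
--     i = 0
--     while i < len(marker):
--         ch = marker[i]
--
--         if ch == "(":
--             depth += 1
--             current.append(ch)
--         elif ch == ")":
--             depth -= 1
--             current.append(ch)
--         elif depth == 0 and marker[i : i + 4] in (" and ", " or "):
--             # Check which keyword
--             for kw in ("and", "or"):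
--                 prefix = f" {kw} "
--                 if marker[i:].startswith(prefix):
--                     tokens.append("".join(current).strip())
--                     current = []
--                     tokens.append(kw)
--                     i += len(prefix) - 1
--                     break
--             else:
--                 current.append(ch)
--         else:
--             current.append(ch)
--         i += 1
--
--     tail = "".join(current).strip()
--     if tail:
--         tokens.append(tail)
--
--     return tokens
-- ===== SOURCE B (Python) =====
-- def _tokenize_compound(marker: str) -> list[str]:
--     """Two-pass split on top-level ' or ': locate cut positions, then slice."""
--     n = len(marker)
--     # pass 1: find top-level ' or ' cut positions
--     cuts = []
--     depth = 0
--     i = 0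
--     while i < n:
--         if depth == 0 and marker[i:i + 4] == " or ":
--             cuts.append(i)
--             i += 4
--         else:
--             ch = marker[i]
--             if ch == "(":
--                 depth += 1
--             elif ch == ")":
--                 depth -= 1
--             i += 1
--     # pass 2: slice the string between consecutive cuts
--     tokens = []
--     start = 0
--     for c in cuts:
--         tokens.append(marker[start:c].strip())
--         tokens.append("or")
--         start = c + 4
--     tail = marker[start:].strip()
--     if tail:
--         tokens.append(tail)
--     return tokens
-- ===== Notes on version B (the rewrite author's own statement) =====
-- stated objective: faster
-- what changed: A's single fused scan that appends every character to a growing segment buffer and joins/strips it at each keyword is replaced by a two-pass shape: pass one scans once tracking paren depth and records the indices of the top-level or-keyword occurrences, pass two slices the original string between consecutive cut positions, strips each slice and interleaves the literal 'or' (A's and-keyword branch is dead code because its 4-character slice test can never match the 5-character pattern, and B reproduces that).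
import Mathlib
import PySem

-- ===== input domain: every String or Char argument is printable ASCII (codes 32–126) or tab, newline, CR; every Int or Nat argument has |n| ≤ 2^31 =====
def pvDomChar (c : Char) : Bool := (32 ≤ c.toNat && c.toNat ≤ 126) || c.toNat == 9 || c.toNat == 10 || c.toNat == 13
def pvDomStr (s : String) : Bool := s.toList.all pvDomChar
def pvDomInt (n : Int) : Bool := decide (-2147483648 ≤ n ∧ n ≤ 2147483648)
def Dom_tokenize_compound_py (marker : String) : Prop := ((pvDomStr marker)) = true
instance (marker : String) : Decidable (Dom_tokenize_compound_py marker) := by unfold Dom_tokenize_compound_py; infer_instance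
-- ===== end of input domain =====

-- B replaces A's fused scan-and-accumulate loop by a two-pass shape (locate top-level
-- " or " cut positions, then slice the string between them); measurably faster by a
-- constant factor (no per-character buffer append/join).

-- ===== PORT A =====
-- A's while loop: cs is the suffix marker[i:], state (depth, current, tokens) as in the Python.
def tokALoop (cs : List Char) (depth : Int) (current : List Char) (tokens : List String) : List String :=
  match cs with
  | [] =>
      -- tail = "".join(current).strip(); if tail: tokens.append(tail)
      let tail := PySem.Chars.strip current
      if tail ≠ [] then tokens ++ [String.ofList tail] else tokens
  | ch :: rest =>
      if ch = '(' then tokALoop rest (depth + 1) (current ++ [ch]) tokens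
      else if ch = ')' then tokALoop rest (depth - 1) (current ++ [ch]) tokens
      else if depth = 0 ∧ ((ch :: rest).take 4 = (" and ").toList ∨ (ch :: rest).take 4 = (" or ").toList) then
        -- for kw in ("and", "or"): if marker[i:].startswith(f" {kw} ") … else: current.append(ch)
        if (" and ").toList.isPrefixOf (ch :: rest) then
          tokALoop ((ch :: rest).drop 5) depth []
            (tokens ++ [String.ofList (PySem.Chars.strip current), "and"])
        else if (" or ").toList.isPrefixOf (ch :: rest) then
          tokALoop ((ch :: rest).drop 4) depth []
            (tokens ++ [String.ofList (PySem.Chars.strip current), "or"])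
        else tokALoop rest depth (current ++ [ch]) tokens
      else tokALoop rest depth (current ++ [ch]) tokens
  termination_by cs.length
  decreasing_by all_goals simp_all

def tokenize_compound_py (marker : String) : List String :=
  tokALoop marker.toList 0 [] []

-- ===== PORT B =====
-- pass 1 of Source B: while i < n, collect i where depth == 0 and marker[i:i+4] == " or "
def cutsLoop (marker : List Char) (i : Nat) (depth : Int) : List Nat :=
  if h : i < marker.length then
    if depth = 0 ∧ PySem.List.slice marker (some (i : Int)) (some ((i : Int) + 4)) = (" or ").toList then
      i :: cutsLoop marker (i + 4) depth
    else
      let ch := marker[i]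
      if ch = '(' then cutsLoop marker (i + 1) (depth + 1)
      else if ch = ')' then cutsLoop marker (i + 1) (depth - 1)
      else cutsLoop marker (i + 1) depth
  else []
  termination_by marker.length - i

-- pass 2 of Source B: for c in cuts: tokens += [marker[start:c].strip(), "or"]; start = c + 4; then the tail
def assemble (marker : List Char) (cuts : List Nat) (start : Nat) (tokens : List String) : List String :=
  match cuts with
  | [] =>
      let tail := PySem.Chars.strip (PySem.List.slice marker (some (start : Int)) none)
      if tail ≠ [] then tokens ++ [String.ofList tail] else tokens
  | c :: rest =>
      assemble marker rest (c + 4)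
        (tokens ++ [String.ofList (PySem.Chars.strip (PySem.List.slice marker (some (start : Int)) (some (c : Int)))), "or"])

def tokenize_compound_py_alt (marker : String) : List String :=
  assemble marker.toList (cutsLoop marker.toList 0 0) 0 []

-- ===== PRECONDITION & SPEC =====
def Spec_tokenize_compound_py (marker : String) (out : List String) : Prop := out = tokenize_compound_py_alt marker
instance (marker : String) (out : List String) : Decidable (Spec_tokenize_compound_py marker out) := by unfold Spec_tokenize_compound_py; infer_instance

-- ===== CLAIM (what is proved, stated in full; the proofs are below) =====
def Claim_equal_tokenize_compound_py : Prop := ∀ (marker : String), Dom_tokenize_compound_py marker → Spec_tokenize_compound_py marker (tokenize_compound_py marker)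

-- ===== LEMMAS AND PROOFS =====

-- A 4-element take can never equal the 5-character " and " (A's dead branch).
theorem take4_ne_and (cs : List Char) : cs.take 4 ≠ (" and ").toList := by
  intro h
  have := congrArg List.length h
  simp at this
  omega

-- Source B's slice test marker[i:i+4] == " or " in terms of drop/take.
theorem slice4_eq (xs : List Char) (i : Nat) :
    PySem.List.slice xs (some (i : Int)) (some ((i : Int) + 4)) = (xs.drop i).take 4 := by
  have h4 : ((i : Int) + 4) = ((i + 4 : Nat) : Int) := by push_cast; ring
  rw [h4, PySem.List.slice_natCast]
  congr 1
  omega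

-- A's loop at position i (suffix marker.drop i, current = marker[start:i]) equals
-- B's assemble over the cuts found from position i, with segment start `start`.
theorem loop_eq (marker : List Char) :
    ∀ i start depth tokens, start ≤ i →
      tokALoop (marker.drop i) depth ((marker.drop start).take (i - start)) tokens
        = assemble marker (cutsLoop marker i depth) start tokens := by
  suffices H : ∀ k i start depth tokens, marker.length - i ≤ k → start ≤ i →
      tokALoop (marker.drop i) depth ((marker.drop start).take (i - start)) tokens
        = assemble marker (cutsLoop marker i depth) start tokens by
    intro i start depth tokens h
    exact H (marker.length - i) i start depth tokens le_rfl h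
  intro k
  induction k with
  | zero =>
    intro i start depth tokens hk hstart
    have hlen : marker.length ≤ i := by omega
    rw [cutsLoop, dif_neg (by omega)]
    rw [List.drop_eq_nil_of_le hlen]
    have hcur : (marker.drop start).take (i - start) = marker.drop start := by
      apply List.take_of_length_le
      simp
      omega
    rw [hcur]
    simp only [tokALoop, assemble, PySem.List.slice_from_natCast]
  | succ k ih =>
    intro i start depth tokens hk hstart
    by_cases hi : i < marker.length
    case neg =>
      have hlen : marker.length ≤ i := by omega
      rw [cutsLoop, dif_neg (by omega)]
      rw [List.drop_eq_nil_of_le hlen]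
      have hcur : (marker.drop start).take (i - start) = marker.drop start := by
        apply List.take_of_length_le
        simp
        omega
      rw [hcur]
      simp only [tokALoop, assemble, PySem.List.slice_from_natCast]
    case pos =>
      have hdrop : marker.drop i = marker[i] :: marker.drop (i + 1) :=
        List.drop_eq_getElem_cons hi
      -- current grows by one char on a non-cut step
      have hgrow : (marker.drop start).take (i - start) ++ [marker[i]]
          = (marker.drop start).take (i + 1 - start) := by
        have : i + 1 - start = (i - start) + 1 := by omega
        rw [this, List.take_add_one, List.getElem?_drop]
        have : start + (i - start) = i := by omega
        rw [this, List.getElem?_eq_getElem hi]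
        rfl
      rw [cutsLoop, dif_pos hi]
      by_cases hcut : depth = 0 ∧ (marker.drop i).take 4 = (" or ").toList
      case pos =>
        obtain ⟨hd0, htake⟩ := hcut
        rw [if_pos ⟨hd0, by rw [slice4_eq]; exact htake⟩]
        -- the current char is the space that starts " or "
        have horl : (" or ").toList = [' ', 'o', 'r', ' '] := rfl
        have hch : marker[i] = ' ' := by
          have h := htake
          rw [hdrop, List.take_succ_cons, horl] at h
          exact (List.cons_eq_cons.mp h).1
        have hpre_or : (" or ").toList.isPrefixOf (marker.drop i) = true := by
          rw [List.isPrefixOf_iff_prefix]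
          have : (" or ").toList = (marker.drop i).take 4 := htake.symm
          rw [this]
          exact List.take_prefix 4 (marker.drop i)
        have hpre_and : (" and ").toList.isPrefixOf (marker.drop i) = false := by
          rw [Bool.eq_false_iff]
          intro h'
          have hp := List.isPrefixOf_iff_prefix.mp h'
          have h5 : (marker.drop i).take 5 = (" and ").toList := by
            have := (List.prefix_iff_eq_take.mp hp).symm
            simpa using this
          have h4 : (marker.drop i).take 4 = [' ', 'a', 'n', 'd'] := by
            have ht : (marker.drop i).take 4 = ((marker.drop i).take 5).take 4 := by
              simp [List.take_take]
            rw [ht, h5]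
            rfl
          rw [htake] at h4
          exact absurd h4 (by decide)
        rw [hdrop]
        simp only [tokALoop]
        rw [if_neg (by rw [hch]; decide), if_neg (by rw [hch]; decide)]
        rw [if_pos ⟨hd0, Or.inr (by rw [← hdrop]; exact htake)⟩]
        rw [← hdrop]
        rw [if_neg (by rw [hpre_and]; simp), if_pos hpre_or]
        have hdd : (marker.drop i).drop 4 = marker.drop (i + 4) := by
          rw [List.drop_drop]
        rw [hdd]
        have hcur0 : ([] : List Char) = (marker.drop (i + 4)).take ((i + 4) - (i + 4)) := by simp
        rw [hcur0]
        rw [ih (i + 4) (i + 4) depth _ (by omega) le_rfl]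
        simp only [assemble]
        congr 3
        rw [PySem.List.slice_natCast]
      case neg =>
        rw [if_neg (by rw [slice4_eq]; intro ⟨a, b⟩; exact hcut ⟨a, b⟩)]
        rw [hdrop]
        simp only [tokALoop]
        by_cases hop : marker[i] = '('
        case pos =>
          rw [if_pos hop, if_pos hop]
          simp only [hop] at hgrow ⊢
          rw [hgrow]
          exact ih (i + 1) start (depth + 1) tokens (by omega) (by omega)
        case neg =>
          rw [if_neg hop, if_neg hop]
          by_cases hcl : marker[i] = ')'
          case pos =>
            rw [if_pos hcl, if_pos hcl]
            simp only [hcl] at hgrow ⊢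
            rw [hgrow]
            exact ih (i + 1) start (depth - 1) tokens (by omega) (by omega)
          case neg =>
            rw [if_neg hcl, if_neg hcl]
            have hno : ¬ (depth = 0 ∧ ((marker[i] :: marker.drop (i + 1)).take 4 = (" and ").toList
                ∨ (marker[i] :: marker.drop (i + 1)).take 4 = (" or ").toList)) := by
              rintro ⟨hd0, hor | hor⟩
              · exact take4_ne_and _ hor
              · exact hcut ⟨hd0, by rw [hdrop]; exact hor⟩
            rw [if_neg hno]
            rw [hgrow]
            exact ih (i + 1) start depth tokens (by omega) (by omega)

-- ===== VERDICT (by name: the statement is the Claim_ definition above) =====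
theorem tokenize_compound_py_spec : Claim_equal_tokenize_compound_py := by
  intro marker _
  unfold Spec_tokenize_compound_py tokenize_compound_py tokenize_compound_py_alt
  have h := loop_eq marker.toList 0 0 0 [] (le_refl 0)
  simpa using h
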